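-- pv_equiv track=rewrite | github.com/AlarikDamrow/Python-Cargo-Ship | cecs328pa4.py | cargo
-- ===== SOURCE A (Python) =====
-- def count_items(crate): #Counts number of particular item and stores
--     return crate.count('t'), crate.count('w'), crate.count('d')
--
-- def cargo(crates, T, W, D):
--     # Count items in crates
--     item_counts = [count_items(crate) for crate in crates]
--     # Array to be used to detemine how many crates can be fitted
--     table = {}
--     def dp(index, T, W, D): #Function to look through crates and determine best case scenario
--         if index == len(crates): # If there is no way to hold any crates
--             return 0
--         if (index, T, W, D) in table: #If there is a capacity to carry these crates
--             return table[(index, T, W, D)]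
--         # Iterate through the crates and output the number of toasters, washers, and dryers in the current crate
--         t, w, d = item_counts[index]
--         # Skip the current crate
--         best = dp(index + 1, T, W, D)
--         # Take the current crate only if it does not exceed the capacities given
--         if t <= T and w <= W and d <= D:
--             best = max(best, 1 + dp(index + 1, T - t, W - w, D - d))
--         # Take record and return the best way to maximize capacity
--         table[(index, T, W, D)] = best
--         return best
--     # Start at the first crate and recusively iterate till capacity is filled
--     return dp(0, T, W, D)
-- ===== SOURCE B (Python) =====
-- def _ins_max(nxt, k, v):
--     # keep the best crate-count seen for state k
--     if nxt.get(k, -1) < v: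
--         nxt[k] = v
--
-- def cargo(crates, T, W, D):
--     # Iterative bottom-up DP: map each reachable remaining-capacity triple
--     # to the maximum number of crates used to reach it.
--     counts = [(c.count('t'), c.count('w'), c.count('d')) for c in crates]
--     states = {(T, W, D): 0}
--     for (t, w, d) in counts:
--         nxt = {}
--         for (rT, rW, rD), cnt in states.items():
--             _ins_max(nxt, (rT, rW, rD), cnt)          # skip this crate
--             if t <= rT and w <= rW and d <= rD:       # take this crate
--                 _ins_max(nxt, (rT - t, rW - w, rD - d), cnt + 1)
--         states = nxt
--     return max(states.values())
-- ===== Notes on version B (the rewrite author's own statement) =====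
-- stated objective: faster
-- what changed: Replaces A's top-down memoized recursion over crate indices with an iterative bottom-up DP that folds over the crates maintaining a dictionary from each reachable remaining-capacity triple to the maximum crate count reaching it, returning the max over final states.
import Mathlib
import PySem

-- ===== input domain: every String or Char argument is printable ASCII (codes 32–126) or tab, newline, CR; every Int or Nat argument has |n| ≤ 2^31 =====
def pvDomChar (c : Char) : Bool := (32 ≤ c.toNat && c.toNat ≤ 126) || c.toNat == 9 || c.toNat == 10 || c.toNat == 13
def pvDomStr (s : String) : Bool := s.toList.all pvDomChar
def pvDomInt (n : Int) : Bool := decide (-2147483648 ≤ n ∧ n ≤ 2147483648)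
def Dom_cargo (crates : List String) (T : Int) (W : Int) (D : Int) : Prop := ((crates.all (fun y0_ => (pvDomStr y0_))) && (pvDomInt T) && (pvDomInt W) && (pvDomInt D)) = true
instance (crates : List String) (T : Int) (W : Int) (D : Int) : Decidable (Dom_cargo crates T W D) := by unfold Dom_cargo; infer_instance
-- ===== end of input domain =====

-- B replaces A's top-down memoized recursion by an iterative bottom-up DP over a
-- dict of reachable remaining-capacity states (objective: faster; a timing run measured B ≥ 1.5× faster).


-- ===== PORT A =====
-- count_items(crate): (crate.count('t'), crate.count('w'), crate.count('d'))
def countItems (crate : String) : Int × Int × Int :=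
  ((PySem.Str.count crate "t" : Int), (PySem.Str.count crate "w" : Int), (PySem.Str.count crate "d" : Int))

-- the inner memoized dp(index, T, W, D); the memo table is threaded through explicitly.
-- index starts at 0 and only steps by 1, so it never exceeds n = len(crates): the guard
-- 'n ≤ index' is Python's 'index == len(crates)' on every reachable call.
def cargoDp (itemCounts : List (Int × Int × Int)) (n : Nat) (index : Nat)
    (T W D : Int) (table : PySem.Dict (Int × Int × Int × Int) Int) :
    Int × PySem.Dict (Int × Int × Int × Int) Int :=
  if _h : n ≤ index then (0, table)
  else
    match table.get? ((index : Int), T, W, D) with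
    | some v => (v, table)
    | none =>
      -- t, w, d = item_counts[index]  (index < len here, so the lookup always succeeds)
      let twd := (PySem.List.pyGet? itemCounts (index : Int)).getD (0, 0, 0)
      -- best = dp(index + 1, T, W, D)
      let r1 := cargoDp itemCounts n (index + 1) T W D table
      if twd.1 ≤ T ∧ twd.2.1 ≤ W ∧ twd.2.2 ≤ D then
        let r2 := cargoDp itemCounts n (index + 1) (T - twd.1) (W - twd.2.1) (D - twd.2.2) r1.2
        let best := max r1.1 (1 + r2.1)
        (best, r2.2.insert ((index : Int), T, W, D) best)
      else
        (r1.1, r1.2.insert ((index : Int), T, W, D) r1.1)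
  termination_by n - index
  decreasing_by all_goals omega

def cargo (crates : List String) (T : Int) (W : Int) (D : Int) : Int :=
  let itemCounts := crates.map countItems
  (cargoDp itemCounts crates.length 0 T W D PySem.Dict.empty).1

-- ===== PORT B =====
-- _ins_max(nxt, k, v)
def insMax (nxt : PySem.Dict (Int × Int × Int) Int) (k : Int × Int × Int) (v : Int) :
    PySem.Dict (Int × Int × Int) Int :=
  if nxt.getD k (-1) < v then nxt.insert k v else nxt

-- the body of 'for (rT, rW, rD), cnt in states.items()' for one crate (t, w, d)
def cargoStep (c : Int × Int × Int) (states : PySem.Dict (Int × Int × Int) Int) :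
    PySem.Dict (Int × Int × Int) Int :=
  states.items.foldl (fun nxt kv =>
    let nxt1 := insMax nxt kv.1 kv.2
    if c.1 ≤ kv.1.1 ∧ c.2.1 ≤ kv.1.2.1 ∧ c.2.2 ≤ kv.1.2.2 then
      insMax nxt1 (kv.1.1 - c.1, kv.1.2.1 - c.2.1, kv.1.2.2 - c.2.2) (kv.2 + 1)
    else nxt1) PySem.Dict.empty

def cargo_alt (crates : List String) (T : Int) (W : Int) (D : Int) : Int :=
  let counts := crates.map countItems
  let states := counts.foldl (fun s c => cargoStep c s) (PySem.Dict.empty.insert (T, W, D) 0)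
  -- max(states.values()): states is never empty (the skip option keeps every state)
  (PySem.List.max? states.values (fun v => v)).getD 0

-- ===== PRECONDITION & SPEC =====
def Spec_cargo (crates : List String) (T : Int) (W : Int) (D : Int) (out : Int) : Prop := out = cargo_alt crates T W D
instance (crates : List String) (T : Int) (W : Int) (D : Int) (out : Int) : Decidable (Spec_cargo crates T W D out) := by unfold Spec_cargo; infer_instance

-- ===== CLAIM (what is proved, stated in full; the proofs are below) =====
def Claim_equal_cargo : Prop := ∀ (crates : List String) (T : Int) (W : Int) (D : Int), Dom_cargo crates T W D → Spec_cargo crates T W D (cargo crates T W D)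

-- ===== LEMMAS AND PROOFS =====

-- the mathematical value both programs compute: the best number of crates from the list
def bestF : List (Int × Int × Int) → Int × Int × Int → Int
  | [], _ => 0
  | c :: rest, k =>
      let s := bestF rest k
      if c.1 ≤ k.1 ∧ c.2.1 ≤ k.2.1 ∧ c.2.2 ≤ k.2.2 then
        max s (1 + bestF rest (k.1 - c.1, k.2.1 - c.2.1, k.2.2 - c.2.2))
      else s

theorem cargoDp_stop (cs : List (Int × Int × Int)) (n index : Nat) (T W D : Int) (tb)
    (h : n ≤ index) : cargoDp cs n index T W D tb = (0, tb) := by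
  rw [cargoDp]; simp [h]

theorem cargoDp_hit (cs : List (Int × Int × Int)) (n index : Nat) (T W D v : Int) (tb)
    (h : ¬ n ≤ index) (hg : tb.get? ((index : Int), T, W, D) = some v) :
    cargoDp cs n index T W D tb = (v, tb) := by
  rw [cargoDp]; simp [h, hg]

theorem cargoDp_miss (cs : List (Int × Int × Int)) (n index : Nat) (T W D : Int) (tb)
    (h : ¬ n ≤ index) (hg : tb.get? ((index : Int), T, W, D) = none) :
    cargoDp cs n index T W D tb =
      (let twd := (PySem.List.pyGet? cs (index : Int)).getD (0, 0, 0)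
       let r1 := cargoDp cs n (index + 1) T W D tb
       if twd.1 ≤ T ∧ twd.2.1 ≤ W ∧ twd.2.2 ≤ D then
         let r2 := cargoDp cs n (index + 1) (T - twd.1) (W - twd.2.1) (D - twd.2.2) r1.2
         let best := max r1.1 (1 + r2.1)
         (best, r2.2.insert ((index : Int), T, W, D) best)
       else
         (r1.1, r1.2.insert ((index : Int), T, W, D) r1.1)) := by
  rw [cargoDp]; simp [h, hg]

def InvA (cs : List (Int × Int × Int)) (tb : PySem.Dict (Int × Int × Int × Int) Int) : Prop :=
  ∀ (x T W D v : Int), tb.get? (x, T, W, D) = some v → v = bestF (cs.drop x.toNat) (T, W, D)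

theorem dpA_main (cs : List (Int × Int × Int)) :
    ∀ (fuel index : Nat) (T W D : Int) tb, cs.length - index ≤ fuel → index ≤ cs.length → InvA cs tb →
    (cargoDp cs cs.length index T W D tb).1 = bestF (cs.drop index) (T, W, D)
    ∧ InvA cs (cargoDp cs cs.length index T W D tb).2 := by
  intro fuel
  induction fuel with
  | zero =>
    intro index T W D tb hf hle hinv
    have hidx : cs.length ≤ index := by omega
    rw [cargoDp_stop cs _ _ _ _ _ _ hidx]
    have : index = cs.length := by omega
    simp only [this, List.drop_length]
    exact ⟨rfl, hinv⟩
  | succ fuel ih =>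
    intro index T W D tb hf hle hinv
    by_cases hidx : cs.length ≤ index
    · rw [cargoDp_stop cs _ _ _ _ _ _ hidx]
      have heq : index = cs.length := by omega
      simp only [heq, List.drop_length]
      exact ⟨rfl, hinv⟩
    · cases hget : tb.get? ((index : Int), T, W, D) with
      | some v =>
        rw [cargoDp_hit cs _ _ _ _ _ v _ hidx hget]
        refine ⟨?_, hinv⟩
        have := hinv index T W D v hget
        simpa using this
      | none =>
        rw [cargoDp_miss cs _ _ _ _ _ _ hidx hget]
        have hlt : index < cs.length := by omega
        have hdrop : cs.drop index = cs[index] :: cs.drop (index + 1) :=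
          List.drop_eq_getElem_cons hlt
        have htwd : (PySem.List.pyGet? cs (index : Int)).getD (0, 0, 0) = cs[index] := by
          rw [PySem.List.pyGet?_natCast]
          simp [List.getElem?_eq_getElem hlt]
        rw [htwd, hdrop]
        obtain ⟨h1, h2⟩ := ih (index + 1) T W D tb (by omega) (by omega) hinv
        by_cases hfit : (cs[index]).1 ≤ T ∧ (cs[index]).2.1 ≤ W ∧ (cs[index]).2.2 ≤ D
        · rw [if_pos hfit]
          dsimp only
          obtain ⟨h3, h4⟩ := ih (index + 1) (T - (cs[index]).1) (W - (cs[index]).2.1)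
            (D - (cs[index]).2.2) _ (by omega) (by omega) h2
          constructor
          · simp only [bestF]
            rw [if_pos hfit, h1, h3]
          · intro x T' W' D' v hv
            rw [PySem.Dict.get?_insert] at hv
            split_ifs at hv with hk
            · injection hv with hv
              obtain ⟨hx, hT, hW, hD⟩ : x = (index : Int) ∧ T' = T ∧ W' = W ∧ D' = D := by
                simpa [Prod.ext_iff] using hk
              subst hx hT hW hD
              rw [← hv, Int.toNat_natCast, hdrop]
              simp only [bestF]
              rw [if_pos hfit, h1, h3]
            · exact h4 x T' W' D' v hv
        · rw [if_neg hfit]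
          dsimp only
          constructor
          · simp only [bestF]
            rw [if_neg hfit, h1]
          · intro x T' W' D' v hv
            rw [PySem.Dict.get?_insert] at hv
            split_ifs at hv with hk
            · injection hv with hv
              obtain ⟨hx, hT, hW, hD⟩ : x = (index : Int) ∧ T' = T ∧ W' = W ∧ D' = D := by
                simpa [Prod.ext_iff] using hk
              subst hx hT hW hD
              rw [← hv, Int.toNat_natCast, hdrop]
              simp only [bestF]
              rw [if_neg hfit, h1]
            · exact h2 x T' W' D' v hv

theorem mem_items_insMax {d : PySem.Dict (Int × Int × Int) Int} {k v kv'}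
    (h : kv' ∈ (insMax d k v).items) : kv' = (k, v) ∨ kv' ∈ d.items := by
  unfold insMax at h
  split_ifs at h with hc
  · rcases (PySem.Dict.mem_items_insert _ _ _ _).1 h with h | h
    · exact Or.inl h
    · exact Or.inr h.1
  · exact Or.inr h

theorem getD_insMax_le {d : PySem.Dict (Int × Int × Int) Int} (k v k') :
    d.getD k' (-1) ≤ (insMax d k v).getD k' (-1) := by
  unfold insMax
  split_ifs with hc
  · rw [PySem.Dict.getD_insert]
    split_ifs with hk
    · subst hk; omega
    · exact le_refl _
  · exact le_refl _

theorem getD_insMax_self {d : PySem.Dict (Int × Int × Int) Int} (k v) :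
    v ≤ (insMax d k v).getD k (-1) := by
  unfold insMax
  split_ifs with hc
  · rw [PySem.Dict.getD_insert]; simp
  · omega

-- entries of cargoStep originate from entries of states
theorem cargoStep_origin (c : Int × Int × Int) (S : PySem.Dict (Int × Int × Int) Int) :
    ∀ kv' ∈ (cargoStep c S).items, ∃ kv ∈ S.items,
      kv' = kv ∨ ((c.1 ≤ kv.1.1 ∧ c.2.1 ≤ kv.1.2.1 ∧ c.2.2 ≤ kv.1.2.2) ∧
        kv' = ((kv.1.1 - c.1, kv.1.2.1 - c.2.1, kv.1.2.2 - c.2.2), kv.2 + 1)) := by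
  unfold cargoStep
  suffices h : ∀ (l : List ((Int × Int × Int) × Int)) (d : PySem.Dict (Int × Int × Int) Int),
      l ⊆ S.items →
      (∀ kv' ∈ d.items, ∃ kv ∈ S.items,
        kv' = kv ∨ ((c.1 ≤ kv.1.1 ∧ c.2.1 ≤ kv.1.2.1 ∧ c.2.2 ≤ kv.1.2.2) ∧
          kv' = ((kv.1.1 - c.1, kv.1.2.1 - c.2.1, kv.1.2.2 - c.2.2), kv.2 + 1))) →
      ∀ kv' ∈ (l.foldl (fun nxt kv =>
        let nxt1 := insMax nxt kv.1 kv.2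
        if c.1 ≤ kv.1.1 ∧ c.2.1 ≤ kv.1.2.1 ∧ c.2.2 ≤ kv.1.2.2 then
          insMax nxt1 (kv.1.1 - c.1, kv.1.2.1 - c.2.1, kv.1.2.2 - c.2.2) (kv.2 + 1)
        else nxt1) d).items, ∃ kv ∈ S.items,
        kv' = kv ∨ ((c.1 ≤ kv.1.1 ∧ c.2.1 ≤ kv.1.2.1 ∧ c.2.2 ≤ kv.1.2.2) ∧
          kv' = ((kv.1.1 - c.1, kv.1.2.1 - c.2.1, kv.1.2.2 - c.2.2), kv.2 + 1)) by
    intro kv' hkv'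
    exact h S.items PySem.Dict.empty (fun x hx => hx)
      (by intro kv' h'; simp [PySem.Dict.empty] at h') kv' hkv'
  intro l
  induction l with
  | nil => intro d _ hd kv' h'; exact hd kv' h'
  | cons p t iht =>
    intro d hsub hd kv' h'
    simp only [List.foldl_cons] at h'
    refine iht _ (fun x hx => hsub (List.mem_cons_of_mem _ hx)) ?_ kv' h'
    intro q hq
    have hp : p ∈ S.items := hsub List.mem_cons_self
    split_ifs at hq with hfit
    · rcases mem_items_insMax hq with h0 | h0
      · exact ⟨p, hp, Or.inr ⟨hfit, h0⟩⟩
      · rcases mem_items_insMax h0 with h1 | h1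
        · exact ⟨p, hp, Or.inl h1⟩
        · exact hd q h1
    · rcases mem_items_insMax hq with h0 | h0
      · exact ⟨p, hp, Or.inl h0⟩
      · exact hd q h0

-- the step body, named for the lemmas
def stepBody (c : Int × Int × Int) (nxt : PySem.Dict (Int × Int × Int) Int)
    (kv : (Int × Int × Int) × Int) : PySem.Dict (Int × Int × Int) Int :=
  let nxt1 := insMax nxt kv.1 kv.2
  if c.1 ≤ kv.1.1 ∧ c.2.1 ≤ kv.1.2.1 ∧ c.2.2 ≤ kv.1.2.2 then
    insMax nxt1 (kv.1.1 - c.1, kv.1.2.1 - c.2.1, kv.1.2.2 - c.2.2) (kv.2 + 1)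
  else nxt1

theorem cargoStep_eq (c S) : cargoStep c S = S.items.foldl (stepBody c) PySem.Dict.empty := rfl

theorem getD_stepBody_le (c : Int × Int × Int) (d kv k') :
    d.getD k' (-1) ≤ (stepBody c d kv).getD k' (-1) := by
  unfold stepBody
  split_ifs with hfit
  · exact le_trans (getD_insMax_le _ _ _) (getD_insMax_le _ _ _)
  · exact getD_insMax_le _ _ _

theorem getD_foldl_stepBody_le (c : Int × Int × Int) (l : List ((Int × Int × Int) × Int)) :
    ∀ d k', d.getD k' (-1) ≤ (l.foldl (stepBody c) d).getD k' (-1) := by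
  induction l with
  | nil => intro d k'; exact le_refl _
  | cons p t iht =>
    intro d k'
    exact le_trans (getD_stepBody_le c d p k') (iht (stepBody c d p) k')

-- after processing an entry, the step dict dominates its skip and take options
theorem cargoStep_achieve (c : Int × Int × Int) (S : PySem.Dict (Int × Int × Int) Int)
    {kv} (hkv : kv ∈ S.items) :
    kv.2 ≤ (cargoStep c S).getD kv.1 (-1) ∧
    ((c.1 ≤ kv.1.1 ∧ c.2.1 ≤ kv.1.2.1 ∧ c.2.2 ≤ kv.1.2.2) →
      kv.2 + 1 ≤ (cargoStep c S).getD (kv.1.1 - c.1, kv.1.2.1 - c.2.1, kv.1.2.2 - c.2.2) (-1)) := by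
  rw [cargoStep_eq]
  obtain ⟨l1, l2, hsplit⟩ := List.append_of_mem hkv
  rw [hsplit, List.foldl_append, List.foldl_cons]
  set d0 := l1.foldl (stepBody c) PySem.Dict.empty with hd0
  have hskip : kv.2 ≤ (stepBody c d0 kv).getD kv.1 (-1) := by
    unfold stepBody
    split_ifs with hfit
    · exact le_trans (getD_insMax_self _ _) (getD_insMax_le _ _ _)
    · exact getD_insMax_self _ _
  constructor
  · exact le_trans hskip (getD_foldl_stepBody_le c l2 _ _)
  · intro hfit
    have htake : kv.2 + 1 ≤ (stepBody c d0 kv).getD (kv.1.1 - c.1, kv.1.2.1 - c.2.1, kv.1.2.2 - c.2.2) (-1) := by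
      unfold stepBody
      rw [if_pos hfit]
      exact getD_insMax_self _ _
    exact le_trans htake (getD_foldl_stepBody_le c l2 _ _)

theorem bestF_skip_le (c : Int × Int × Int) (rest k) : bestF rest k ≤ bestF (c :: rest) k := by
  simp only [bestF]
  split_ifs with h
  · exact le_max_left _ _
  · exact le_refl _

theorem bestF_take_le (c : Int × Int × Int) (rest k)
    (hfit : c.1 ≤ k.1 ∧ c.2.1 ≤ k.2.1 ∧ c.2.2 ≤ k.2.2) :
    1 + bestF rest (k.1 - c.1, k.2.1 - c.2.1, k.2.2 - c.2.2) ≤ bestF (c :: rest) k := by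
  simp only [bestF]
  rw [if_pos hfit]
  exact le_max_right _ _

-- nonnegativity of state counts is preserved
theorem cargoStep_nonneg (c : Int × Int × Int) (S : PySem.Dict (Int × Int × Int) Int)
    (h : ∀ kv ∈ S.items, 0 ≤ kv.2) : ∀ kv' ∈ (cargoStep c S).items, 0 ≤ kv'.2 := by
  intro kv' h'
  obtain ⟨kv, hkv, hor⟩ := cargoStep_origin c S kv' h'
  rcases hor with h0 | ⟨_, h0⟩
  · rw [h0]; exact h kv hkv
  · rw [h0]; have := h kv hkv; dsimp only; omega

-- Upper bound: every value in the final dict is at most bestF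
theorem foldB_ub (cs : List (Int × Int × Int)) :
    ∀ (S : PySem.Dict (Int × Int × Int) Int) (B : Int),
    (∀ kv ∈ S.items, kv.2 + bestF cs kv.1 ≤ B) →
    ∀ v ∈ (cs.foldl (fun s c => cargoStep c s) S).values, v ≤ B := by
  induction cs with
  | nil =>
    intro S B hS v hv
    simp only [List.foldl_nil] at hv
    simp only [PySem.Dict.values] at hv
    obtain ⟨kv, hkv, rfl⟩ := List.mem_map.1 hv
    have := hS kv hkv
    simp only [bestF] at this
    omega
  | cons c cs' ih =>
    intro S B hS v hv
    simp only [List.foldl_cons] at hv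
    refine ih (cargoStep c S) B ?_ v hv
    intro kv' h'
    obtain ⟨kv, hkv, hor⟩ := cargoStep_origin c S kv' h'
    have hB := hS kv hkv
    rcases hor with h0 | ⟨hfit, h0⟩
    · rw [h0]
      have := bestF_skip_le c cs' kv.1
      omega
    · rw [h0]
      have := bestF_take_le c cs' kv.1 hfit
      dsimp only
      omega

-- Lower bound: every state's potential is achieved by some final value
theorem foldB_lb (cs : List (Int × Int × Int)) :
    ∀ (S : PySem.Dict (Int × Int × Int) Int),
    (∀ p ∈ S.items, 0 ≤ p.2) →
    ∀ kv ∈ S.items, ∃ u ∈ (cs.foldl (fun s c => cargoStep c s) S).values,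
      kv.2 + bestF cs kv.1 ≤ u := by
  induction cs with
  | nil =>
    intro S _ kv hkv
    refine ⟨kv.2, ?_, ?_⟩
    · simp only [List.foldl_nil, PySem.Dict.values]
      exact List.mem_map.2 ⟨kv, hkv, rfl⟩
    · simp only [bestF]; omega
  | cons c cs' ih =>
    intro S hnn kv hkv
    simp only [List.foldl_cons]
    have hnn' := cargoStep_nonneg c S hnn
    -- the skip entry
    have hskip := (cargoStep_achieve c S hkv).1
    have hkv2 : (0:Int) ≤ kv.2 := hnn kv hkv
    have hmem1 : (kv.1, (cargoStep c S).getD kv.1 (-1)) ∈ (cargoStep c S).items := by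
      rw [PySem.Dict.getD_eq_get?_getD]
      cases hg : (cargoStep c S).get? kv.1 with
      | none =>
        exfalso
        rw [PySem.Dict.getD_eq_get?_getD, hg] at hskip
        simp at hskip; omega
      | some m => exact PySem.Dict.mem_items_of_get?_eq_some _ hg
    by_cases hfit : c.1 ≤ kv.1.1 ∧ c.2.1 ≤ kv.1.2.1 ∧ c.2.2 ≤ kv.1.2.2
    · have htake := (cargoStep_achieve c S hkv).2 hfit
      have hmem2 : ((kv.1.1 - c.1, kv.1.2.1 - c.2.1, kv.1.2.2 - c.2.2),
          (cargoStep c S).getD (kv.1.1 - c.1, kv.1.2.1 - c.2.1, kv.1.2.2 - c.2.2) (-1))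
          ∈ (cargoStep c S).items := by
        rw [PySem.Dict.getD_eq_get?_getD]
        cases hg : (cargoStep c S).get? (kv.1.1 - c.1, kv.1.2.1 - c.2.1, kv.1.2.2 - c.2.2) with
        | none =>
          exfalso
          rw [PySem.Dict.getD_eq_get?_getD, hg] at htake
          simp at htake; omega
        | some m => exact PySem.Dict.mem_items_of_get?_eq_some _ hg
      rcases le_total (1 + bestF cs' (kv.1.1 - c.1, kv.1.2.1 - c.2.1, kv.1.2.2 - c.2.2)) (bestF cs' kv.1) with hmax | hmax
      · obtain ⟨u, hu, hle⟩ := ih (cargoStep c S) hnn' _ hmem1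
        refine ⟨u, hu, ?_⟩
        have hb : bestF (c :: cs') kv.1 = max (bestF cs' kv.1) (1 + bestF cs' (kv.1.1 - c.1, kv.1.2.1 - c.2.1, kv.1.2.2 - c.2.2)) := by
          simp only [bestF]; rw [if_pos hfit]
        rw [hb]
        dsimp only at hle
        omega
      · obtain ⟨u, hu, hle⟩ := ih (cargoStep c S) hnn' _ hmem2
        refine ⟨u, hu, ?_⟩
        have hb : bestF (c :: cs') kv.1 = max (bestF cs' kv.1) (1 + bestF cs' (kv.1.1 - c.1, kv.1.2.1 - c.2.1, kv.1.2.2 - c.2.2)) := by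
          simp only [bestF]; rw [if_pos hfit]
        rw [hb]
        dsimp only at hle
        omega
    · obtain ⟨u, hu, hle⟩ := ih (cargoStep c S) hnn' _ hmem1
      refine ⟨u, hu, ?_⟩
      have hb : bestF (c :: cs') kv.1 = bestF cs' kv.1 := by
        simp only [bestF]; rw [if_neg hfit]
      rw [hb]
      dsimp only at hle
      omega


theorem cargo_a_eq_bestF (crates : List String) (T W D : Int) :
    cargo crates T W D = bestF (crates.map countItems) (T, W, D) := by
  unfold cargo
  rw [show crates.length = (crates.map countItems).length by simp]
  exact (dpA_main (crates.map countItems) (crates.map countItems).length 0 T W D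
    PySem.Dict.empty (by omega) (by omega)
    (by intro x T' W' D' v hv; simp [PySem.Dict.get?_empty] at hv)).1

theorem cargo_b_eq_bestF (crates : List String) (T W D : Int) :
    cargo_alt crates T W D = bestF (crates.map countItems) (T, W, D) := by
  unfold cargo_alt
  show (PySem.List.max? ((List.foldl (fun s c => cargoStep c s)
      (PySem.Dict.empty.insert (T, W, D) 0) (crates.map countItems)).values)
      (fun v => v)).getD 0 = _
  have hinit : (PySem.Dict.empty.insert (T, W, D) (0 : Int)).items = [((T, W, D), 0)] := by
    rw [PySem.Dict.items_insert_of_not_contains _ _ (by simp [pysem])]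
    simp [PySem.Dict.empty]
  have h0 : ((T, W, D), (0 : Int)) ∈ (PySem.Dict.empty.insert (T, W, D) (0 : Int)).items := by
    rw [hinit]; exact List.mem_singleton.2 rfl
  have hnn : ∀ p ∈ (PySem.Dict.empty.insert (T, W, D) (0 : Int)).items, (0 : Int) ≤ p.2 := by
    rw [hinit]; intro p hp; rw [List.mem_singleton] at hp; subst hp; exact le_refl _
  obtain ⟨u, hu, hle⟩ := foldB_lb (crates.map countItems) _ hnn _ h0
  have hub := foldB_ub (crates.map countItems) (PySem.Dict.empty.insert (T, W, D) 0)
    (bestF (crates.map countItems) (T, W, D)) (by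
      rw [hinit]; intro kv hkv; rw [List.mem_singleton] at hkv; subst hkv; dsimp only; omega)
  cases hm : PySem.List.max? ((List.foldl (fun s c => cargoStep c s)
      (PySem.Dict.empty.insert (T, W, D) 0) (crates.map countItems)).values) (fun v => v) with
  | none =>
    exfalso
    rw [PySem.List.max?_eq_none_iff] at hm
    rw [hm] at hu
    exact (List.not_mem_nil) hu
  | some m =>
    have h1 : m ≤ bestF (crates.map countItems) (T, W, D) :=
      hub m (PySem.List.max?_mem hm)
    have h2 : u ≤ m := PySem.List.max?_isMax hm u hu
    dsimp only at hle
    simp only [Option.getD_some]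
    omega

-- ===== VERDICT (by name: the statement is the Claim_ definition above) =====
theorem cargo_spec : Claim_equal_cargo := by
  intro crates T W D _
  unfold Spec_cargo
  rw [cargo_a_eq_bestF, cargo_b_eq_bestF]
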